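-- pv_equiv track=rewrite | github.com/Hazel-Datastax/astrapy-play-around | test/path_to_steps.py | path_to_steps
-- ===== SOURCE A (Python) =====
-- def path_to_steps(path: str) -> list[str]:
--     """
--     Parses the path into steps according to the rules:
--       1) '[' is a start marker if:
--          1.1) it appears at start-of-string or right after '.'
--          1.2) it is NOT immediately followed by another '['
--          1.3) there is a valid end marker ']' (which must be followed by '.' or end-of-string)
--       2) ']' is a valid end marker only if it matches a recognized '['
--          and is followed by '.' or end-of-string.
--       3) Otherwise, '.' splits steps.
--          If multiple '[' occur consecutively without forming a start marker,
--          we reduce them by 1 bracket (e.g. '[[' -> '[', '[[[' -> '[[').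
--     """
--
--     steps = []
--     buffer = []  # Collect characters for the current step
--     n = len(path)
--     i = 0
--
--     def flush_buffer():
--         """Flush whatever is in the buffer to steps as a single step (if not empty)."""
--         if buffer:
--             steps.append("".join(buffer))
--             buffer.clear()
--
--     while i < n:
--         c = path[i]
--
--         if c == '.':
--             # '.' always ends the current step
--             flush_buffer()
--             i += 1
--             continue
--
--         if c == '[':
--             # Potential start marker?
--             # Check rule (1.1): either i==0 or path[i-1]=='.'
--             # Check rule (1.2): next char != '[' (if it exists)
--             can_be_start = False
--             if i == 0 or (i > 0 and path[i - 1] == '.'):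
--                 if i + 1 < n and path[i+1] != '[':
--                     can_be_start = True
--                 elif i + 1 == n:
--                     # Edge case: '[' is the very last char => can't be a start marker anyway
--                     can_be_start = False
--
--             if can_be_start:
--                 # Attempt to find a valid end marker ']' that is followed by '.' or end-of-string
--                 j = i + 1
--                 found_end = -1
--                 while j < n:
--                     if path[j] == ']':
--                         # Check if ']' is followed by '.' or end-of-string
--                         if j == n - 1 or (j + 1 < n and path[j+1] == '.'):
--                             found_end = j
--                             break
--                     j += 1
--
--                 if found_end != -1:
--                     # We found a valid bracketed step [ ... ]
--                     # flush anything currently in buffer as one step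
--                     flush_buffer()
--                     # The inside content is path[i+1 : found_end]
--                     inside = path[i+1:found_end]
--                     steps.append(inside)
--                     # Move i past the ']'
--                     i = found_end + 1
--                     # If that ']' was followed by a dot, skip it
--                     if i < n and path[i] == '.':
--                         i += 1
--                     continue
--                 # else => we did not find a valid end bracket
--                 # so we treat '[' as literal
--
--             # If we get here, the '[' is not a valid start marker => literal
--             # We might have multiple '[' in a row => rule 3.2
--             run_start = i
--             while i < n and path[i] == '[':
--                 i += 1
--             run_len = i - run_start
--             # For run_len brackets, we store (run_len - 1) if run_len > 1, else 1
--             store_count = run_len - 1 if run_len > 1 else 1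
--             buffer.append('[' * store_count)
--
--             continue  # continue the main loop
--
--         else:
--             # Normal character, just accumulate
--             buffer.append(c)
--             i += 1
--
--     # End of string => flush remaining buffer
--     flush_buffer()
--     return steps
-- ===== SOURCE B (Python) =====
-- def _reduce(seg: str) -> str:
--     """Collapse each maximal run of '[' of length k to k-1 brackets (k>1), else keep 1."""
--     out = []
--     i = 0
--     m = len(seg)
--     while i < m:
--         if seg[i] == '[':
--             r = i
--             while r < m and seg[r] == '[':
--                 r += 1
--             k = r - i
--             out.append('[' * (k - 1 if k > 1 else 1))
--             i = r
--         else: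
--             out.append(seg[i])
--             i += 1
--     return ''.join(out)
--
--
-- def path_to_steps(path: str) -> list[str]:
--     """Staged algorithm: (1) precompute the sorted lists of valid end markers and
--     candidate start markers; (2) merge them with an advancing pointer into the list
--     of recognized bracket spans; (3) assemble the steps: the text between spans is
--     split on '.' and bracket-reduced, span contents are taken verbatim."""
--     n = len(path)
--     ends = [j for j in range(n)
--             if path[j] == ']' and (j == n - 1 or path[j + 1] == '.')]
--     cands = [i for i in range(n)
--              if path[i] == '[' and (i == 0 or path[i - 1] == '.')
--              and i + 1 < n and path[i + 1] != '[']
--     spans = []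
--     pos = 0
--     p = 0
--     for c in cands:
--         if c < pos:
--             continue
--         while p < len(ends) and ends[p] <= c:
--             p += 1
--         if p == len(ends):
--             break
--         j = ends[p]
--         spans.append((c, j))
--         pos = j + 1
--
--     def tokens(region: str) -> list[str]:
--         return [_reduce(seg) for seg in region.split('.') if seg]
--
--     steps = []
--     prev = 0
--     for (c, j) in spans:
--         steps.extend(tokens(path[prev:c]))
--         steps.append(path[c + 1:j])
--         prev = j + 1
--     steps.extend(tokens(path[prev:]))
--     return steps
-- ===== Notes on version B (the rewrite author's own statement) =====
-- stated objective: alternative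
-- what changed: B replaces A's single interleaved scanning loop by three staged passes: it precomputes the sorted lists of valid end markers and candidate start markers, merges them with an advancing pointer into the list of recognized bracket spans, and then assembles the steps by splitting the between-span text on '.' and bracket-reducing it, taking span contents verbatim.
import Mathlib
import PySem

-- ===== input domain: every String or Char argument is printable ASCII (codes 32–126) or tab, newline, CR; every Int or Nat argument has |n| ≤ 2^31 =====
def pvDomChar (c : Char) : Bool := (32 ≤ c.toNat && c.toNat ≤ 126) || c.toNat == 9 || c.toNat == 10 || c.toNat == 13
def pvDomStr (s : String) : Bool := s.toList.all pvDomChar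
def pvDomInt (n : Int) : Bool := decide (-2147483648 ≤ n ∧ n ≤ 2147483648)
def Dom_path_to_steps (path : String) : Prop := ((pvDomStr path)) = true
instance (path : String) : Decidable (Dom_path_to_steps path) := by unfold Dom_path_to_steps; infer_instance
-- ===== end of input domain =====

-- B replaces A's single interleaved scan by staged passes: precomputed end-marker and
-- start-candidate lists merged into bracket spans, then assembly via split-on-dot.

-- ===== PORT A =====
-- flush_buffer: append the joined buffer as one step if non-empty
def pvFlush (steps : List String) (buf : List Char) : List String :=
  if buf = [] then steps else steps ++ [String.ofList buf]

-- A's inner while loop: scan forward from j for a ']' followed by '.' or end-of-string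
def pvFindEnd (s : List Char) (n j : Nat) : Option Nat :=
  if _h : j < n then
    if s[j]! = ']' ∧ (j = n - 1 ∨ (j + 1 < n ∧ s[j+1]! = '.')) then some j
    else pvFindEnd s n (j+1)
  else none
termination_by n - j

-- A's run loop: first index ≥ i whose char is not '['
def pvRunEnd (s : List Char) (n i : Nat) : Nat :=
  if _h : i < n then (if s[i]! = '[' then pvRunEnd s n (i+1) else i) else i
termination_by n - i

-- if that ']' was followed by a dot, skip it
def pvSkipDot (s : List Char) (n i : Nat) : Nat :=
  if i < n ∧ s[i]! = '.' then i + 1 else i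

-- store (run_len - 1) brackets if run_len > 1, else 1
def pvStore (runLen : Nat) : Nat := if runLen > 1 then runLen - 1 else 1

-- A's main while loop; fuel n+1 suffices since i strictly increases each iteration
def pvLoopA (s : List Char) (n : Nat) : Nat → Nat → List String → List Char → List String
  | 0, _, steps, buf => pvFlush steps buf
  | fuel+1, i, steps, buf =>
    if i < n then
      if s[i]! = '.' then
        pvLoopA s n fuel (i+1) (pvFlush steps buf) []
      else if s[i]! = '[' then
        if (i = 0 ∨ (0 < i ∧ s[i-1]! = '.')) ∧ (i + 1 < n ∧ s[i+1]! ≠ '[') then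
          match pvFindEnd s n (i+1) with
          | some j =>
            pvLoopA s n fuel (pvSkipDot s n (j+1))
              (pvFlush steps buf ++ [String.ofList ((s.drop (i+1)).take (j - (i+1)))]) []
          | none =>
            pvLoopA s n fuel (pvRunEnd s n i) steps
              (buf ++ List.replicate (pvStore (pvRunEnd s n i - i)) '[')
        else
          pvLoopA s n fuel (pvRunEnd s n i) steps
            (buf ++ List.replicate (pvStore (pvRunEnd s n i - i)) '[')
      else
        pvLoopA s n fuel (i+1) steps (buf ++ [s[i]!])
    else pvFlush steps buf

def path_to_steps (path : String) : List String :=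
  pvLoopA path.toList path.toList.length (path.toList.length + 1) 0 [] []

-- ===== PORT B =====
-- _reduce: collapse each maximal run of '[' of length k to (k-1 if k>1 else 1) brackets
def pvReduce : List Char → List Char
  | [] => []
  | c :: t =>
    if c = '[' then
      let k := 1 + (t.takeWhile (fun d => d = '[')).length
      List.replicate (if k > 1 then k - 1 else 1) '[' ++ pvReduce (t.dropWhile (fun d => d = '['))
    else c :: pvReduce t
termination_by l => l.length
decreasing_by
  · simpa using Nat.lt_succ_of_le (List.length_dropWhile_le _ _)
  · simp

-- Source B's end-marker test: ']' followed by '.' or end-of-string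
def pvValidEnd (s : List Char) (n : Nat) (j : Nat) : Bool :=
  s[j]! == ']' && (j == n - 1 || s[j+1]! == '.')

-- Source B's start-candidate test
def pvIsCand (s : List Char) (n : Nat) (i : Nat) : Bool :=
  s[i]! == '[' && (i == 0 || s[i-1]! == '.') && decide (i + 1 < n) && s[i+1]! != '['

def pvEnds (s : List Char) (n : Nat) : List Nat := (List.range n).filter (pvValidEnd s n)
def pvCands (s : List Char) (n : Nat) : List Nat := (List.range n).filter (pvIsCand s n)

-- merge candidates with the end list (advancing pointer = dropping a prefix of rem)
def pvMkSpans : List Nat → Nat → List Nat → List (Nat × Nat)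
  | [], _, _ => []
  | c :: cs, pos, rem =>
    if c < pos then pvMkSpans cs pos rem
    else
      match rem.dropWhile (fun j => decide (j ≤ c)) with
      | [] => []
      | j :: r' => (c, j) :: pvMkSpans cs (j+1) (j :: r')

-- tokens(region): split on '.', drop empty segments, bracket-reduce the rest
def pvTokens (region : List Char) : List String :=
  ((List.splitOn '.' region).filter (fun seg => seg ≠ [])).map
    (fun seg => String.ofList (pvReduce seg))

-- assembly: between-span text is tokenized, span contents taken verbatim
def pvAssemble (s : List Char) (n : Nat) : List (Nat × Nat) → Nat → List String
  | [], prev => pvTokens (s.drop prev)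
  | (c, j) :: rest, prev =>
      pvTokens ((s.drop prev).take (c - prev)) ++
        [String.ofList ((s.drop (c+1)).take (j - (c+1)))] ++ pvAssemble s n rest (j+1)

def path_to_steps_alt (path : String) : List String :=
  pvAssemble path.toList path.toList.length
    (pvMkSpans (pvCands path.toList path.toList.length) 0
      (pvEnds path.toList path.toList.length)) 0

-- ===== PRECONDITION & SPEC =====
def Spec_path_to_steps (path : String) (out : List String) : Prop := out = path_to_steps_alt path
instance (path : String) (out : List String) : Decidable (Spec_path_to_steps path out) := by unfold Spec_path_to_steps; infer_instance

-- ===== CLAIM (what is proved, stated in full; the proofs are below) =====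
def Claim_equal_path_to_steps : Prop := ∀ (path : String), Dom_path_to_steps path → Spec_path_to_steps path (path_to_steps path)

-- ===== LEMMAS AND PROOFS =====

-- proof-side helpers: the assembly generalized over A's pending buffer
def pvFlushT (buf : List Char) : List String :=
  if buf = [] then [] else [String.ofList buf]

def pvTokensBuf (buf region : List Char) : List String :=
  match List.splitOn '.' region with
  | [] => pvFlushT buf
  | seg :: rest =>
      pvFlushT (buf ++ pvReduce seg) ++
        (rest.filter (fun sg => sg ≠ [])).map (fun sg => String.ofList (pvReduce sg))

def pvAsmB (s : List Char) (n : Nat) : List (Nat × Nat) → Nat → List Char → List String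
  | [], prev, buf => pvTokensBuf buf ((s.drop prev).take (n - prev))
  | (c, j) :: rest, prev, buf =>
      pvTokensBuf buf ((s.drop prev).take (c - prev)) ++
        [String.ofList ((s.drop (c+1)).take (j - (c+1)))] ++ pvAsmB s n rest (j+1) []

-- pvMkSpans with the pointer state replaced by the full end list (spec version)
def pvMkSpansF (e : List Nat) : List Nat → Nat → List (Nat × Nat)
  | [], _ => []
  | c :: cs, pos =>
    if c < pos then pvMkSpansF e cs pos
    else
      match e.dropWhile (fun j => decide (j ≤ c)) with
      | [] => []
      | j :: _ => (c, j) :: pvMkSpansF e cs (j+1)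

lemma pvFlush_eq (steps : List String) (buf : List Char) :
    pvFlush steps buf = steps ++ pvFlushT buf := by
  unfold pvFlush pvFlushT; split <;> simp

lemma pv_splitOn_nil : List.splitOn '.' ([] : List Char) = [[]] := by
  simp [List.splitOn]

lemma pv_splitOn_dot (t : List Char) :
    List.splitOn '.' ('.' :: t) = [] :: List.splitOn '.' t := by
  simp [List.splitOn, List.splitOnP_cons]

lemma pv_splitOn_char (c : Char) (t : List Char) (h : c ≠ '.') :
    List.splitOn '.' (c :: t) = (List.splitOn '.' t).modifyHead (c :: ·) := by
  simp [List.splitOn, List.splitOnP_cons, h]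

lemma pv_splitOn_ne_nil (t : List Char) : List.splitOn '.' t ≠ [] := by
  induction t with
  | nil => simp [pv_splitOn_nil]
  | cons c t ih =>
    by_cases h : c = '.'
    · subst h; simp [pv_splitOn_dot]
    · rw [pv_splitOn_char c t h]
      cases hs : List.splitOn '.' t with
      | nil => exact absurd hs ih
      | cons a l => simp

lemma pvReduce_ne_nil (l : List Char) (h : l ≠ []) : pvReduce l ≠ [] := by
  cases l with
  | nil => exact absurd rfl h
  | cons c t =>
    rw [pvReduce]
    by_cases hc : c = '['
    · simp only [hc]
      intro he
      rcases List.append_eq_nil_iff.mp he with ⟨h1, _⟩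
      rw [List.replicate_eq_nil_iff] at h1
      split at h1 <;> omega
    · simp [hc]

lemma pvTokensBuf_nil_eq (buf : List Char) : pvTokensBuf buf [] = pvFlushT buf := by
  unfold pvTokensBuf
  rw [pv_splitOn_nil]
  simp [pvReduce]

lemma pvTokensBuf_empty (region : List Char) : pvTokensBuf [] region = pvTokens region := by
  unfold pvTokensBuf pvTokens
  cases hs : List.splitOn '.' region with
  | nil => exact absurd hs (pv_splitOn_ne_nil region)
  | cons seg rest =>
    by_cases hseg : seg = []
    · subst hseg
      simp [pvFlushT, pvReduce]
    · have : pvReduce seg ≠ [] := pvReduce_ne_nil seg hseg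
      simp [pvFlushT, hseg, this]

lemma pvTokensBuf_dot (buf t : List Char) :
    pvTokensBuf buf ('.' :: t) = pvFlushT buf ++ pvTokensBuf [] t := by
  rw [pvTokensBuf_empty]
  unfold pvTokensBuf pvTokens
  rw [pv_splitOn_dot]
  cases hs : List.splitOn '.' t with
  | nil => exact absurd hs (pv_splitOn_ne_nil t)
  | cons seg rest =>
    by_cases hseg : seg = []
    · subst hseg; simp [pvFlushT, pvReduce]
    · have : pvReduce seg ≠ [] := pvReduce_ne_nil seg hseg
      simp [pvFlushT, pvReduce, hseg, this]

lemma pvTokensBuf_char (buf t : List Char) (c : Char) (hd : c ≠ '.') (hb : c ≠ '[') :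
    pvTokensBuf buf (c :: t) = pvTokensBuf (buf ++ [c]) t := by
  unfold pvTokensBuf
  rw [pv_splitOn_char c t hd]
  cases hs : List.splitOn '.' t with
  | nil => exact absurd hs (pv_splitOn_ne_nil t)
  | cons seg rest =>
    simp only [List.modifyHead]
    rw [pvReduce]
    simp [hb]

lemma pv_takeWhile_replicate (m : Nat) (rest : List Char)
    (hr : ∀ c, rest.head? = some c → c ≠ '[') :
    (List.replicate m '[' ++ rest).takeWhile (fun d => d = '[') = List.replicate m '[' := by
  induction m with
  | zero =>
    simp only [List.replicate, List.nil_append]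
    cases rest with
    | nil => rfl
    | cons a l =>
      have := hr a (by simp)
      simp [List.takeWhile_cons, this]
  | succ k ih => simp [List.replicate_succ, List.takeWhile_cons, ih]

lemma pv_dropWhile_replicate (m : Nat) (rest : List Char)
    (hr : ∀ c, rest.head? = some c → c ≠ '[') :
    (List.replicate m '[' ++ rest).dropWhile (fun d => d = '[') = rest := by
  induction m with
  | zero =>
    simp only [List.replicate, List.nil_append]
    cases rest with
    | nil => rfl
    | cons a l =>
      have := hr a (by simp)
      simp [List.dropWhile_cons, this]
  | succ k ih => simp [List.replicate_succ, List.dropWhile_cons, ih]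

lemma pvReduce_run (k : Nat) (hk : 1 ≤ k) (rest : List Char)
    (hr : ∀ c, rest.head? = some c → c ≠ '[') :
    pvReduce (List.replicate k '[' ++ rest) =
      List.replicate (pvStore k) '[' ++ pvReduce rest := by
  obtain ⟨m, rfl⟩ : ∃ m, k = m + 1 := ⟨k - 1, by omega⟩
  rw [List.replicate_succ, List.cons_append, pvReduce]
  rw [pv_takeWhile_replicate m rest hr, pv_dropWhile_replicate m rest hr]
  simp only [List.length_replicate]
  have hcnt : (if 1 + m > 1 then 1 + m - 1 else 1) = pvStore (m + 1) := by
    unfold pvStore; split_ifs <;> omega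
  rw [hcnt]
  simp

lemma pv_splitOn_replicate (k : Nat) (rest : List Char) (seg : List Char)
    (r2 : List (List Char)) (hs : List.splitOn '.' rest = seg :: r2) :
    List.splitOn '.' (List.replicate k '[' ++ rest) = (List.replicate k '[' ++ seg) :: r2 := by
  induction k with
  | zero => simpa using hs
  | succ m ih =>
    rw [List.replicate_succ, List.cons_append, pv_splitOn_char _ _ (by decide), ih]
    simp [List.replicate_succ]

lemma pv_first_seg_head (rest : List Char) (seg : List Char) (r2 : List (List Char))
    (hs : List.splitOn '.' rest = seg :: r2)
    (hr : ∀ c, rest.head? = some c → c ≠ '[') :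
    ∀ c, seg.head? = some c → c ≠ '[' := by
  cases rest with
  | nil =>
    rw [pv_splitOn_nil] at hs
    obtain ⟨rfl, _⟩ : ([] : List Char) = seg ∧ ([] : List (List Char)) = r2 := by
      simpa using hs.symm
    simp
  | cons a t =>
    by_cases ha : a = '.'
    · subst ha
      rw [pv_splitOn_dot] at hs
      obtain rfl : ([] : List Char) = seg := by simpa using (congrArg List.head? hs).symm
      simp
    · rw [pv_splitOn_char a t ha] at hs
      cases ht : List.splitOn '.' t with
      | nil => exact absurd ht (pv_splitOn_ne_nil t)
      | cons sg r =>
        rw [ht] at hs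
        simp only [List.modifyHead] at hs
        obtain rfl : a :: sg = seg := by simpa using congrArg List.head? hs
        intro c hc
        have hac : a = c := by simpa using hc
        exact hac ▸ hr a (by simp)

lemma pvTokensBuf_run (buf : List Char) (k : Nat) (hk : 1 ≤ k) (rest : List Char)
    (hr : ∀ c, rest.head? = some c → c ≠ '[') :
    pvTokensBuf buf (List.replicate k '[' ++ rest) =
      pvTokensBuf (buf ++ List.replicate (pvStore k) '[') rest := by
  cases hs : List.splitOn '.' rest with
  | nil => exact absurd hs (pv_splitOn_ne_nil rest)
  | cons seg r2 =>
    unfold pvTokensBuf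
    rw [pv_splitOn_replicate k rest seg r2 hs, hs]
    show pvFlushT (buf ++ pvReduce (List.replicate k '[' ++ seg)) ++
        (r2.filter (fun sg => sg ≠ [])).map (fun sg => String.ofList (pvReduce sg)) =
      pvFlushT (buf ++ List.replicate (pvStore k) '[' ++ pvReduce seg) ++
        (r2.filter (fun sg => sg ≠ [])).map (fun sg => String.ofList (pvReduce sg))
    rw [pvReduce_run k hk seg (pv_first_seg_head rest seg r2 hs hr), ← List.append_assoc]

-- ===== mkSpans lemmas =====

lemma pv_head?_dropWhile {α : Type} (p : α → Bool) (a : α) : ∀ (l : List α),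
    (l.dropWhile p).head? = some a → p a = false := by
  intro l
  induction l with
  | nil => simp
  | cons b t ih =>
    by_cases h : p b
    · simp [h]; exact ih
    · simp [h]
      rintro rfl; simp [h]

lemma pvMkSpansF_all_lt (e : List Nat) : ∀ (cs : List Nat) (pos : Nat),
    (∀ c ∈ cs, c < pos) → pvMkSpansF e cs pos = [] := by
  intro cs
  induction cs with
  | nil => intro pos _; rfl
  | cons c cs ih =>
    intro pos h
    rw [pvMkSpansF, if_pos (h c (by simp))]
    exact ih pos (fun x hx => h x (by simp [hx]))

lemma pvMkSpansF_head (e : List Nat) : ∀ (cs : List Nat) (i : Nat),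
    cs.Pairwise (· < ·) → i ∈ cs →
    pvMkSpansF e cs i =
      (match e.dropWhile (fun j => decide (j ≤ i)) with
       | [] => []
       | j :: _ => (i, j) :: pvMkSpansF e cs (j+1)) := by
  intro cs
  induction cs with
  | nil => intro i _ hm; simp at hm
  | cons a cs ih =>
    intro i hp hm
    rcases List.mem_cons.mp hm with rfl | hm'
    · rw [pvMkSpansF, if_neg (lt_irrefl i)]
      cases hE : e.dropWhile (fun j => decide (j ≤ i)) with
      | nil => rfl
      | cons j r =>
        have hji : decide (j ≤ i) = false := pv_head?_dropWhile _ j e (by rw [hE]; rfl)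
        have hji' : i < j := by simpa using hji
        show (i, j) :: pvMkSpansF e cs (j+1) = (i, j) :: pvMkSpansF e (i :: cs) (j+1)
        congr 1
        rw [pvMkSpansF, if_pos (show i < j + 1 by omega)]
    · have ha : a < i := (List.pairwise_cons.mp hp).1 i hm'
      have hskip : pvMkSpansF e (a :: cs) i = pvMkSpansF e cs i := by
        rw [pvMkSpansF, if_pos ha]
      rw [hskip, ih i (List.pairwise_cons.mp hp).2 hm']
      cases hE : e.dropWhile (fun j => decide (j ≤ i)) with
      | nil => rfl
      | cons j r =>
        have hji : decide (j ≤ i) = false := pv_head?_dropWhile _ j e (by rw [hE]; rfl)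
        have hji' : i < j := by simpa using hji
        show (i, j) :: pvMkSpansF e cs (j+1) = (i, j) :: pvMkSpansF e (a :: cs) (j+1)
        congr 1
        rw [pvMkSpansF, if_pos (show a < j + 1 by omega)]

lemma pvMkSpansF_shift (e : List Nat) : ∀ (cs : List Nat) (pos pos' : Nat),
    pos ≤ pos' → (∀ c ∈ cs, ¬(pos ≤ c ∧ c < pos')) →
    pvMkSpansF e cs pos = pvMkSpansF e cs pos' := by
  intro cs pos pos' hle h
  induction cs with
  | nil => rfl
  | cons c cs ih =>
    by_cases hc : c < pos
    · rw [pvMkSpansF, pvMkSpansF, if_pos hc, if_pos (by omega)]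
      exact ih (fun x hx => h x (by simp [hx]))
    · have h2 : ¬ c < pos' := fun hlt => h c (by simp) ⟨by omega, hlt⟩
      rw [pvMkSpansF, pvMkSpansF, if_neg hc, if_neg h2]

lemma pvMkSpansF_exhausted (e : List Nat) (m : Nat)
    (hm : e.dropWhile (fun j => decide (j ≤ m)) = []) :
    ∀ (cs : List Nat) (pos : Nat), (∀ c ∈ cs, pos ≤ c → m ≤ c) →
    pvMkSpansF e cs pos = [] := by
  have hall : ∀ x ∈ e, x ≤ m := by
    rw [List.dropWhile_eq_nil_iff] at hm
    intro x hx
    simpa using hm x hx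
  intro cs
  induction cs with
  | nil => intro pos _; rfl
  | cons c cs ih =>
    intro pos h
    rw [pvMkSpansF]
    by_cases hc : c < pos
    · rw [if_pos hc]
      exact ih pos (fun x hx => h x (by simp [hx]))
    · rw [if_neg hc]
      have hcm : m ≤ c := h c (by simp) (by omega)
      have hE : e.dropWhile (fun j => decide (j ≤ c)) = [] := by
        rw [List.dropWhile_eq_nil_iff]
        intro x hx
        have := hall x hx
        simp; omega
      rw [hE]

lemma pvMkSpansF_head_bounds (e : List Nat) : ∀ (cs : List Nat) (pos c j : Nat)
    (rest : List (Nat × Nat)), pvMkSpansF e cs pos = (c, j) :: rest →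
    pos ≤ c ∧ c < j ∧ c ∈ cs := by
  intro cs
  induction cs with
  | nil => intro pos c j rest h; simp [pvMkSpansF] at h
  | cons a cs ih =>
    intro pos c j rest h
    rw [pvMkSpansF] at h
    by_cases hc : a < pos
    · rw [if_pos hc] at h
      obtain ⟨h1, h2, h3⟩ := ih pos c j rest h
      exact ⟨h1, h2, by simp [h3]⟩
    · rw [if_neg hc] at h
      cases hE : e.dropWhile (fun x => decide (x ≤ a)) with
      | nil => rw [hE] at h; exact absurd h (by simp)
      | cons j' r =>
        rw [hE] at h
        have hja : decide (j' ≤ a) = false := pv_head?_dropWhile _ j' e (by rw [hE]; rfl)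
        have hja' : a < j' := by simpa using hja
        obtain ⟨rfl, rfl⟩ : a = c ∧ j' = j := by
          have := List.cons.injEq .. ▸ h
          simp at h
          exact ⟨h.1.1, h.1.2⟩
        exact ⟨by omega, hja', by simp⟩

lemma pvMkSpans_eq_spec (e : List Nat) : ∀ (cs : List Nat) (pos : Nat)
    (pre rem : List Nat), e = pre ++ rem → (∀ x ∈ pre, x < pos) →
    pvMkSpans cs pos rem = pvMkSpansF e cs pos := by
  intro cs
  induction cs with
  | nil => intro pos pre rem _ _; rfl
  | cons c cs ih =>
    intro pos pre rem he hpre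
    rw [pvMkSpans, pvMkSpansF]
    by_cases hc : c < pos
    · rw [if_pos hc, if_pos hc]
      exact ih pos pre rem he hpre
    · rw [if_neg hc, if_neg hc]
      have hpre' : pre.dropWhile (fun j => decide (j ≤ c)) = [] := by
        rw [List.dropWhile_eq_nil_iff]
        intro x hx
        have := hpre x hx
        simp; omega
      have hE : e.dropWhile (fun j => decide (j ≤ c)) = rem.dropWhile (fun j => decide (j ≤ c)) := by
        subst he
        rw [List.dropWhile_append, hpre']
        simp
      rw [hE]
      cases hd : rem.dropWhile (fun j => decide (j ≤ c)) with
      | nil => rfl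
      | cons j r' =>
        have hjc : decide (j ≤ c) = false := pv_head?_dropWhile _ j rem (by rw [hd]; rfl)
        have hjc' : c < j := by simpa using hjc
        show (c, j) :: pvMkSpans cs (j+1) (j :: r') = (c, j) :: pvMkSpansF e cs (j+1)
        congr 1
        apply ih (j+1) (pre ++ rem.takeWhile (fun x => decide (x ≤ c))) (j :: r')
        · rw [he, List.append_assoc]
          congr 1
          rw [← hd, List.takeWhile_append_dropWhile]
        · intro x hx
          rcases List.mem_append.mp hx with hx1 | hx2
          · have := hpre x hx1; omega
          · have := List.mem_takeWhile_imp hx2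
            simp at this; omega

-- ===== find-end vs end-list lemmas =====

lemma pv_dropWhile_all_false {α : Type} (p : α → Bool) (l : List α)
    (h : ∀ x ∈ l, p x = false) : l.dropWhile p = l := by
  cases l with
  | nil => rfl
  | cons a t => simp [h a (by simp)]

lemma pv_le_pred_eq (c : Nat) :
    (fun j : Nat => decide (j ≤ c)) = (fun j : Nat => decide (j < c + 1)) := by
  funext j; simp [Nat.lt_succ_iff]

lemma pv_ends_dropWhile (s : List Char) (n k : Nat) :
    ((pvEnds s n).dropWhile (fun j => decide (j < k)))
      = (List.range' k (n - k)).filter (pvValidEnd s n) := by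
  unfold pvEnds
  by_cases hk : k ≤ n
  · have hsplit : List.range n = List.range k ++ List.range' k (n - k) := by
      have hap := @List.range'_append 0 k (n - k) 1
      simp only [Nat.one_mul, Nat.zero_add] at hap
      rw [List.range_eq_range', List.range_eq_range', hap]
      congr 1
      omega
    rw [hsplit, List.filter_append, List.dropWhile_append]
    have h1 : ((List.range k).filter (pvValidEnd s n)).dropWhile (fun j => decide (j < k)) = [] := by
      rw [List.dropWhile_eq_nil_iff]
      intro x hx
      simp only [List.mem_filter, List.mem_range] at hx
      simp [hx.1]
    have h2 : ((List.range' k (n - k)).filter (pvValidEnd s n)).dropWhile (fun j => decide (j < k))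
        = (List.range' k (n - k)).filter (pvValidEnd s n) := by
      apply pv_dropWhile_all_false
      intro x hx
      simp only [List.mem_filter, List.mem_range'_1] at hx
      simp; omega
    simp [h1, h2]
  · have hnk : n - k = 0 := by omega
    rw [hnk]
    simp only [List.range'_zero, List.filter_nil]
    rw [List.dropWhile_eq_nil_iff]
    intro x hx
    simp only [List.mem_filter, List.mem_range] at hx
    simp; omega

lemma pv_findEnd_eq_head (s : List Char) (n : Nat) : ∀ k,
    pvFindEnd s n k
      = ((pvEnds s n).dropWhile (fun j => decide (j < k))).head? := by
  intro k
  rw [pv_ends_dropWhile]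
  fun_induction pvFindEnd s n k with
  | case1 k h hc =>
    have hcv : pvValidEnd s n k = true := by
      unfold pvValidEnd
      rcases hc with ⟨h1, h2⟩
      simp only [h1, beq_self_eq_true, Bool.true_and]
      rcases h2 with h2 | ⟨_, h3⟩
      · simp [h2]
      · simp [h3]
    have hr : n - k = (n - (k+1)) + 1 := by omega
    rw [hr, List.range'_succ]
    simp [hcv]
  | case2 k h hc ih =>
    have hcv : pvValidEnd s n k = false := by
      unfold pvValidEnd
      by_cases h1 : s[k]! = ']'
      · simp only [h1, beq_self_eq_true, Bool.true_and, Bool.or_eq_false_iff,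
          beq_eq_false_iff_ne, ne_eq]
        constructor
        · intro he
          exact hc ⟨h1, Or.inl (by omega)⟩
        · intro hdot
          by_cases he : k = n - 1
          · exact hc ⟨h1, Or.inl he⟩
          · exact hc ⟨h1, Or.inr ⟨by omega, hdot⟩⟩
      · have hb : (s[k]! == ']') = false := beq_eq_false_iff_ne.mpr h1
        rw [hb, Bool.false_and]
    have hr : n - k = (n - (k+1)) + 1 := by omega
    rw [hr, List.range'_succ]
    simp [hcv, ih]
  | case3 k h =>
    have hr : n - k = 0 := by omega
    simp [hr]

-- ===== run-end lemmas =====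

lemma pvRunEnd_props (s : List Char) (n : Nat) : ∀ i,
    i ≤ pvRunEnd s n i ∧ pvRunEnd s n i ≤ max i n ∧
    (∀ t, i ≤ t → t < pvRunEnd s n i → s[t]! = '[') ∧
    (pvRunEnd s n i < n → s[pvRunEnd s n i]! ≠ '[') := by
  intro i
  fun_induction pvRunEnd s n i with
  | case1 i h hb ih =>
    obtain ⟨ih1, ih2, ih3, ih4⟩ := ih
    refine ⟨by omega, by omega, ?_, ih4⟩
    intro t ht1 ht2
    rcases Nat.eq_or_lt_of_le ht1 with rfl | ht1'
    · exact hb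
    · exact ih3 t (by omega) ht2
  | case2 i h hb =>
    exact ⟨le_refl i, le_max_left i n, fun t ht1 ht2 => absurd (lt_of_le_of_lt ht1 ht2) (lt_irrefl i), fun _ => hb⟩
  | case3 i h =>
    exact ⟨le_refl i, le_max_left i n, fun t ht1 ht2 => absurd (lt_of_le_of_lt ht1 ht2) (lt_irrefl i), fun hin => absurd hin h⟩

-- region decomposition
lemma pv_region_cons (s : List Char) (i b : Nat) (hi : i < s.length) (hb : i < b) :
    (s.drop i).take (b - i) = s[i]! :: (s.drop (i+1)).take (b - (i+1)) := by
  rw [List.drop_eq_getElem_cons hi, show b - i = (b - (i+1)) + 1 by omega,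
    List.take_succ_cons, getElem!_pos s i hi]

lemma pv_region_run (s : List Char) (b r : Nat) (hrb : r ≤ b) (hrn : r ≤ s.length) : ∀ i, i ≤ r →
    (∀ t, i ≤ t → t < r → s[t]! = '[') →
    (s.drop i).take (b - i) = List.replicate (r - i) '[' ++ (s.drop r).take (b - r) := by
  intro i hir hch
  induction hd : r - i generalizing i with
  | zero =>
    have : r = i := by omega
    subst this
    simp
  | succ d ih =>
    have hi : i < r := by omega
    rw [pv_region_cons s i b (by omega) (by omega), hch i (le_refl i) hi]
    rw [List.replicate_succ, List.cons_append]
    congr 1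
    exact ih (i+1) (by omega) (fun t ht1 ht2 => hch t (by omega) ht2) (by omega)


-- candidate characterization and helpers for the main induction
lemma pv_cand_iff (s : List Char) (n i : Nat) :
    i ∈ pvCands s n ↔
      i < n ∧ s[i]! = '[' ∧ (i = 0 ∨ s[i-1]! = '.') ∧ i + 1 < n ∧ s[i+1]! ≠ '[' := by
  simp only [pvCands, List.mem_filter, List.mem_range, pvIsCand, Bool.and_eq_true,
    beq_iff_eq, Bool.or_eq_true, bne_iff_ne, decide_eq_true_eq, ne_eq]
  tauto

lemma pv_cand_lt (s : List Char) (n c : Nat) (h : c ∈ pvCands s n) : c < n :=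
  List.mem_range.mp (List.mem_filter.mp h).1

lemma pv_end_lt (s : List Char) (n j : Nat) (h : j ∈ pvEnds s n) : j < n :=
  List.mem_range.mp (List.mem_filter.mp h).1

lemma pvRunEnd_succ_le (s : List Char) (n i : Nat) (hin : i < n) (hbr : s[i]! = '[') :
    i + 1 ≤ pvRunEnd s n i := by
  rw [pvRunEnd, dif_pos hin, if_pos hbr]
  exact (pvRunEnd_props s n (i+1)).1

lemma pvAsmB_dot (s : List Char) (n : Nat) (hn : n = s.length) (sp : List (Nat × Nat))
    (m : Nat) (buf : List Char) (hm : m < n) (hdot : s[m]! = '.')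
    (hsp : ∀ c j rest, sp = (c, j) :: rest → m < c) :
    pvAsmB s n sp m buf = pvFlushT buf ++ pvAsmB s n sp (m+1) [] := by
  cases sp with
  | nil =>
    unfold pvAsmB
    rw [pv_region_cons s m n (by omega) (by omega), hdot, pvTokensBuf_dot]
  | cons cj rest =>
    obtain ⟨c, j⟩ := cj
    have hc := hsp c j rest rfl
    unfold pvAsmB
    rw [pv_region_cons s m c (by omega) hc, hdot, pvTokensBuf_dot]
    simp [List.append_assoc]

lemma pvAsmB_char (s : List Char) (n : Nat) (hn : n = s.length) (sp : List (Nat × Nat))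
    (m : Nat) (buf : List Char) (hm : m < n) (hd : s[m]! ≠ '.') (hb : s[m]! ≠ '[')
    (hsp : ∀ c j rest, sp = (c, j) :: rest → m < c) :
    pvAsmB s n sp m buf = pvAsmB s n sp (m+1) (buf ++ [s[m]!]) := by
  cases sp with
  | nil =>
    unfold pvAsmB
    rw [pv_region_cons s m n (by omega) (by omega), pvTokensBuf_char buf _ _ hd hb]
  | cons cj rest =>
    obtain ⟨c, j⟩ := cj
    have hc := hsp c j rest rfl
    unfold pvAsmB
    rw [pv_region_cons s m c (by omega) hc, pvTokensBuf_char buf _ _ hd hb]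

lemma pvAsmB_run (s : List Char) (n : Nat) (hn : n = s.length) (sp : List (Nat × Nat))
    (i : Nat) (buf : List Char) (hin : i < n) (hbr : s[i]! = '[')
    (hsp : ∀ c j rest, sp = (c, j) :: rest → pvRunEnd s n i < c ∧ c ≤ n) :
    pvAsmB s n sp i buf =
      pvAsmB s n sp (pvRunEnd s n i)
        (buf ++ List.replicate (pvStore (pvRunEnd s n i - i)) '[') := by
  obtain ⟨hir, hrm, hch, hlast⟩ := pvRunEnd_props s n i
  have hrn : pvRunEnd s n i ≤ n := by
    have : max i n = n := Nat.max_eq_right (le_of_lt hin)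
    omega
  have hk : 1 ≤ pvRunEnd s n i - i := by
    have := pvRunEnd_succ_le s n i hin hbr
    omega
  cases sp with
  | nil =>
    unfold pvAsmB
    rw [pv_region_run s n (pvRunEnd s n i) hrn (by omega) i hir hch]
    rw [pvTokensBuf_run buf _ hk _ ?hh]
    case hh =>
      intro c hc
      by_cases hrn' : pvRunEnd s n i < n
      · rw [pv_region_cons s _ n (by omega) (by omega)] at hc
        have : c = s[pvRunEnd s n i]! := by simpa using hc.symm
        exact this ▸ hlast hrn'
      · have h0 : n - pvRunEnd s n i = 0 := by omega
        rw [h0] at hc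
        simp at hc
  | cons cj rest =>
    obtain ⟨c, j⟩ := cj
    obtain ⟨hrc, hcn⟩ := hsp c j rest rfl
    unfold pvAsmB
    rw [pv_region_run s c (pvRunEnd s n i) (by omega) (by omega) i hir hch]
    rw [pvTokensBuf_run buf _ hk _ ?hh2]
    case hh2 =>
      intro x hx
      have hrn' : pvRunEnd s n i < n := by omega
      rw [pv_region_cons s _ c (by omega) (by omega)] at hx
      have : x = s[pvRunEnd s n i]! := by simpa using hx.symm
      exact this ▸ hlast hrn'

-- ===== the main loop/assembly equivalence =====

lemma pv_main_loop (s : List Char) (n : Nat) (hn : n = s.length) :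
    ∀ (fuel i : Nat) (steps : List String) (buf : List Char), n < i + fuel →
    pvLoopA s n fuel i steps buf =
      steps ++ pvAsmB s n (pvMkSpansF (pvEnds s n) (pvCands s n) i) i buf := by
  have hpw : (pvCands s n).Pairwise (· < ·) :=
    List.Pairwise.filter _ (List.pairwise_lt_range)
  have htriv : ∀ i buf steps, ¬ i < n →
      pvFlush steps buf = steps ++ pvAsmB s n (pvMkSpansF (pvEnds s n) (pvCands s n) i) i buf := by
    intro i buf steps hi
    rw [pvMkSpansF_all_lt _ _ i (fun c hc => by have := pv_cand_lt s n c hc; omega)]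
    unfold pvAsmB
    rw [show n - i = 0 by omega]
    rw [List.take_zero, pvTokensBuf_nil_eq, pvFlush_eq]
  intro fuel
  induction fuel with
  | zero =>
    intro i steps buf h
    exact htriv i buf steps (by omega)
  | succ f ih =>
    intro i steps buf h
    rw [pvLoopA]
    by_cases hin : i < n
    · rw [if_pos hin]
      by_cases hdot : s[i]! = '.'
      · -- dot: flush and move on
        rw [if_pos hdot, ih (i+1) (pvFlush steps buf) [] (by omega)]
        have hni : i ∉ pvCands s n := by
          intro hmem
          have := ((pv_cand_iff s n i).mp hmem).2.1
          rw [hdot] at this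
          exact absurd this (by decide)
        have hshift := pvMkSpansF_shift (pvEnds s n) (pvCands s n) i (i+1) (by omega)
          (fun c hc hr => by
            have hci : c = i := by omega
            subst hci
            exact hni hc)
        rw [hshift, pvAsmB_dot s n hn _ i buf hin hdot
          (fun c j rest hEq => by have := pvMkSpansF_head_bounds _ _ _ _ _ _ hEq; omega)]
        rw [pvFlush_eq, List.append_assoc]
      · rw [if_neg hdot]
        by_cases hbr : s[i]! = '['
        · rw [if_pos hbr]
          by_cases hca : (i = 0 ∨ (0 < i ∧ s[i-1]! = '.')) ∧ (i + 1 < n ∧ s[i+1]! ≠ '[')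
          · rw [if_pos hca]
            have hmem : i ∈ pvCands s n := by
              refine (pv_cand_iff s n i).mpr ⟨hin, hbr, ?_, hca.2.1, hca.2.2⟩
              rcases hca.1 with h0 | ⟨_, hp⟩
              · exact Or.inl h0
              · exact Or.inr hp
            have hhead := pvMkSpansF_head (pvEnds s n) (pvCands s n) i hpw hmem
            rw [pv_le_pred_eq] at hhead
            have hfe := pv_findEnd_eq_head s n (i+1)
            cases hE : (pvEnds s n).dropWhile (fun j => decide (j < i+1)) with
            | nil =>
              have hnone : pvFindEnd s n (i+1) = none := by rw [hfe, hE]; rfl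
              rw [hnone]
              show pvLoopA s n f (pvRunEnd s n i) steps
                  (buf ++ List.replicate (pvStore (pvRunEnd s n i - i)) '[') = _
              have hspans : pvMkSpansF (pvEnds s n) (pvCands s n) i = [] := by
                rw [hhead, hE]
              have hr1 := pvRunEnd_succ_le s n i hin hbr
              rw [ih (pvRunEnd s n i) steps
                (buf ++ List.replicate (pvStore (pvRunEnd s n i - i)) '[') (by omega)]
              have hE' : (pvEnds s n).dropWhile (fun j => decide (j ≤ i)) = [] := by
                rw [pv_le_pred_eq, hE]
              rw [pvMkSpansF_exhausted (pvEnds s n) i hE' (pvCands s n) (pvRunEnd s n i)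
                (fun c _ hc => by omega)]
              rw [hspans, pvAsmB_run s n hn [] i buf hin hbr (by intro c j rest hEq; simp at hEq)]
            | cons j r' =>
              have hsome : pvFindEnd s n (i+1) = some j := by rw [hfe, hE]; rfl
              rw [hsome]
              show pvLoopA s n f (pvSkipDot s n (j+1))
                  (pvFlush steps buf ++ [String.ofList ((s.drop (i+1)).take (j - (i+1)))]) [] = _
              have hji : i + 1 ≤ j := by
                have := pv_head?_dropWhile _ j (pvEnds s n) (by rw [hE]; rfl)
                simpa using this
              have hjn : j < n := by
                apply pv_end_lt s n j
                exact ((List.dropWhile_suffix _).subset (by rw [hE]; simp))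
              have hspans : pvMkSpansF (pvEnds s n) (pvCands s n) i =
                  (i, j) :: pvMkSpansF (pvEnds s n) (pvCands s n) (j+1) := by
                rw [hhead, hE]
              rw [ih (pvSkipDot s n (j+1))
                (pvFlush steps buf ++ [String.ofList ((s.drop (i+1)).take (j - (i+1)))]) []
                (by unfold pvSkipDot; split_ifs <;> omega)]
              have hAsm : pvAsmB s n ((i, j) :: pvMkSpansF (pvEnds s n) (pvCands s n) (j+1)) i buf
                  = pvFlushT buf ++ [String.ofList ((s.drop (i+1)).take (j - (i+1)))] ++
                    pvAsmB s n (pvMkSpansF (pvEnds s n) (pvCands s n) (j+1)) (j+1) [] := by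
                simp only [pvAsmB]
                rw [show i - i = 0 by omega, List.take_zero, pvTokensBuf_nil_eq]
              have htail : pvAsmB s n (pvMkSpansF (pvEnds s n) (pvCands s n) (pvSkipDot s n (j+1)))
                  (pvSkipDot s n (j+1)) [] =
                  pvAsmB s n (pvMkSpansF (pvEnds s n) (pvCands s n) (j+1)) (j+1) [] := by
                unfold pvSkipDot
                by_cases hsk : j + 1 < n ∧ s[j+1]! = '.'
                · rw [if_pos hsk]
                  have hni2 : j + 1 ∉ pvCands s n := by
                    intro hmem2
                    have := ((pv_cand_iff s n (j+1)).mp hmem2).2.1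
                    rw [hsk.2] at this
                    exact absurd this (by decide)
                  have hshift2 := pvMkSpansF_shift (pvEnds s n) (pvCands s n) (j+1) (j+2) (by omega)
                    (fun c hc hr => by
                      have hci : c = j + 1 := by omega
                      subst hci
                      exact hni2 hc)
                  rw [hshift2, pvAsmB_dot s n hn _ (j+1) [] hsk.1 hsk.2
                    (fun c j2 rest hEq => by have := pvMkSpansF_head_bounds _ _ _ _ _ _ hEq; omega)]
                  simp [pvFlushT]
                · rw [if_neg hsk]
              rw [htail, hspans, hAsm, pvFlush_eq]
              simp [List.append_assoc]
          · rw [if_neg hca]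
            have hni : i ∉ pvCands s n := by
              intro hmem
              obtain ⟨_, _, h2, h3, h4⟩ := (pv_cand_iff s n i).mp hmem
              apply hca
              refine ⟨?_, h3, h4⟩
              rcases h2 with h0 | hp
              · exact Or.inl h0
              · by_cases h0 : i = 0
                · exact Or.inl h0
                · exact Or.inr ⟨by omega, hp⟩
            have hr1 := pvRunEnd_succ_le s n i hin hbr
            obtain ⟨hir, hrm, hch, hlast⟩ := pvRunEnd_props s n i
            have hshift := pvMkSpansF_shift (pvEnds s n) (pvCands s n) i (pvRunEnd s n i)
              (by omega) ?hno
            case hno =>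
              rintro c hc ⟨hic, hcr⟩
              by_cases hci : c = i
              · exact hni (hci ▸ hc)
              · obtain ⟨_, _, h2, _, _⟩ := (pv_cand_iff s n c).mp hc
                rcases h2 with h0 | hp
                · omega
                · have : s[c-1]! = '[' := hch (c-1) (by omega) (by omega)
                  rw [this] at hp
                  exact absurd hp (by decide)
            rw [ih (pvRunEnd s n i) steps
              (buf ++ List.replicate (pvStore (pvRunEnd s n i - i)) '[') (by omega)]
            rw [hshift, pvAsmB_run s n hn _ i buf hin hbr ?hsp2]
            case hsp2 =>
              intro c j rest hEq
              obtain ⟨hge, _, hcmem⟩ := pvMkSpansF_head_bounds _ _ _ _ _ _ hEq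
              have hcn := pv_cand_lt s n c hcmem
              have hbrc := ((pv_cand_iff s n c).mp hcmem).2.1
              have hne : c ≠ pvRunEnd s n i := by
                intro hceq
                exact hlast (hceq ▸ hcn) (hceq ▸ hbrc)
              omega
        · rw [if_neg hbr, ih (i+1) steps (buf ++ [s[i]!]) (by omega)]
          have hni : i ∉ pvCands s n := by
            intro hmem
            exact hbr ((pv_cand_iff s n i).mp hmem).2.1
          have hshift := pvMkSpansF_shift (pvEnds s n) (pvCands s n) i (i+1) (by omega)
            (fun c hc hr => by
              have hci : c = i := by omega
              subst hci
              exact hni hc)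
          rw [hshift, pvAsmB_char s n hn _ i buf hin hdot hbr
            (fun c j rest hEq => by have := pvMkSpansF_head_bounds _ _ _ _ _ _ hEq; omega)]
    · rw [if_neg hin]
      exact htriv i buf steps hin

lemma pvAsmB_empty (s : List Char) (n : Nat) (hn : n = s.length) :
    ∀ (sp : List (Nat × Nat)) (prev : Nat),
    pvAsmB s n sp prev [] = pvAssemble s n sp prev := by
  intro sp
  induction sp with
  | nil =>
    intro prev
    unfold pvAsmB pvAssemble
    rw [pvTokensBuf_empty]
    congr 1
    subst hn
    exact List.take_of_length_le (by simp)
  | cons cj rest ih =>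
    intro prev
    obtain ⟨c, j⟩ := cj
    unfold pvAsmB pvAssemble
    rw [pvTokensBuf_empty, ih]

theorem pv_main (path : String) : path_to_steps path = path_to_steps_alt path := by
  unfold path_to_steps path_to_steps_alt
  rw [pv_main_loop path.toList path.toList.length rfl (path.toList.length + 1) 0 [] [] (by omega)]
  have h1 := pvMkSpans_eq_spec (pvEnds path.toList path.toList.length)
    (pvCands path.toList path.toList.length) 0 [] (pvEnds path.toList path.toList.length)
    (by simp) (by simp)
  rw [h1, pvAsmB_empty _ _ rfl]
  simp

-- ===== VERDICT (by name: the statement is the Claim_ definition above) =====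
theorem path_to_steps_spec : Claim_equal_path_to_steps := by
  intro path _
  unfold Spec_path_to_steps
  exact pv_main path
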